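-- pv_equiv track=rewrite | github.com/acoustic0422/problem_solve | Programmers/2022/20220521/괄호변환.py | solution
-- ===== SOURCE A (Python) =====
-- def isRight(p):
--     stack = []
--     for c in p:
--         if c == '(':
--             stack.append(c)
--         else:
--             if stack and stack[-1] == '(':
--                 stack.pop()
--             else:
--                 return False
--     if stack:
--         return False
--     else:
--         return True
--
-- def solution(p):
--     answer = ''
--     if p == '':
--         return answer
--     if isRight(p):
--         return p
--
--     u = ''
--     v = ''
--     cnt = 0
--     for i in range(len(p)):
--         if p[i] == '(':
--             cnt += 1
--         else:
--             cnt -= 1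
--         u += p[i]
--         if cnt == 0:
--             v = p[i+1:]
--             break
--
--     if not isRight(u):
--         new = '('
--         new += solution(v)
--         new += ')'
--         for c in u[1:-1]:
--             if c == '(':
--                 new += ')'
--             else:
--                 new += '('
--         answer = new
--     else:
--         u += solution(v)
--         answer = u
--
--     return answer
-- ===== SOURCE B (Python) =====
-- def solution(p):
--     parts = []
--     while p:
--         cnt = 0
--         k = 0
--         while k < len(p):
--             cnt += 1 if p[k] == '(' else -1
--             k += 1
--             if cnt == 0:
--                 break
--         u, v = p[:k], p[k:]
--         if cnt == 0 and p[0] == '(':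
--             parts.append(u)
--             p = v
--         else:
--             flipped = ''.join(')' if c == '(' else '(' for c in u[1:-1])
--             parts.append('(' + solution(v) + ')' + flipped)
--             break
--     return ''.join(parts)
-- ===== Notes on version B (the rewrite author's own statement) =====
-- stated objective: alternative
-- what changed: Replaces A's repeated isRight stack rescans (a full isRight scan of the whole string plus another isRight scan of the u-prefix at every recursion level) by one incremental balance counter per segment: the split point and the rightness test of the prefix (counter reached zero and the string starts with an opening parenthesis) come from the same single scan, and balanced prefixes are peeled iteratively into a parts list joined once.
import Mathlib
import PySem

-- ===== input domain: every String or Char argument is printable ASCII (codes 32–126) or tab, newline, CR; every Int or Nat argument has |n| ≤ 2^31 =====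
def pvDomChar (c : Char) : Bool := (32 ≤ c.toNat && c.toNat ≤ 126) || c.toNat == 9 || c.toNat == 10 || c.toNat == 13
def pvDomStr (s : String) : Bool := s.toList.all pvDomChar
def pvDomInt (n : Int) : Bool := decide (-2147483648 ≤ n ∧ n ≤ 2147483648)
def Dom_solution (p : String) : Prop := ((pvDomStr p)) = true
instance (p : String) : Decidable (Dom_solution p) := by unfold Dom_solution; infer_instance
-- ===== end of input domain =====

-- B replaces A's repeated isRight rescans by one incremental balance scan per segment (alternative algorithm, same measured cost).

-- ===== PORT A =====
-- isRight: Python list 'stack' with append/pop at the end, ported literally.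
def isRightAux (stack : List Char) : List Char → Bool
  | [] => stack.isEmpty
  | c :: r =>
    if c = '(' then isRightAux (stack ++ [c]) r
    else if stack ≠ [] ∧ stack.getLast? = some '(' then isRightAux stack.dropLast r
    else false

def isRightL (p : List Char) : Bool := isRightAux [] p

-- A's for-loop over i with 'break': u accumulates p[i], v = p[i+1:] on break, v = '' otherwise.
def loopA : List Char → Int → List Char → List Char × List Char
  | [], _cnt, u => (u, [])
  | c :: rest, cnt, u =>
    let cnt' := if c = '(' then cnt + 1 else cnt - 1
    if cnt' = 0 then (u ++ [c], rest) else loopA rest cnt' (u ++ [c])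

-- termination helper for solA (cited in decreasing_by)
theorem loopA_len (l : List Char) : ∀ (cnt : Int) (u : List Char),
    l ≠ [] → (loopA l cnt u).2.length < l.length := by
  induction l with
  | nil => intro _ _ h; exact absurd rfl h
  | cons c rest ih =>
    intro cnt u _
    by_cases h0 : (if c = '(' then cnt + 1 else cnt - 1) = 0
    · simp [loopA, h0]
    · by_cases hr : rest = []
      · subst hr; simp [loopA, h0]
      · have := ih (if c = '(' then cnt + 1 else cnt - 1) (u ++ [c]) hr
        simp only [loopA, h0, if_false, List.length_cons]
        omega

def solA (p : List Char) : List Char :=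
  if hp : p = [] then []
  else if isRightL p then p
  else
    let r := loopA p 0 []
    if ¬ isRightL r.1 then
      -- new = '(' + solution(v) + ')' then one flipped char appended per c in u[1:-1]
      (PySem.List.slice r.1 (some 1) (some (-1))).foldl
        (fun s c => s ++ [if c = '(' then ')' else '('])
        ('(' :: (solA r.2 ++ [')']))
    else r.1 ++ solA r.2
termination_by p.length
decreasing_by
  all_goals exact loopA_len p 0 [] hp

def solution (p : String) : String := String.ofList (solA p.toList)

-- ===== PORT B =====
-- B's inner while: one scan with an incremental counter, returns (cnt at exit, split index k).
def scanB : List Char → Int → Int × Nat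
  | [], cnt => (cnt, 0)
  | c :: rest, cnt =>
    let cnt' := if c = '(' then cnt + 1 else cnt - 1
    if cnt' = 0 then (cnt', 1)
    else
      let r := scanB rest cnt'
      (r.1, r.2 + 1)

-- termination helper for solB (cited in decreasing_by)
theorem scanB_pos : ∀ (l : List Char) (cnt : Int), l ≠ [] → 1 ≤ (scanB l cnt).2 := by
  intro l cnt h
  cases l with
  | nil => exact absurd rfl h
  | cons c rest =>
    by_cases h0 : (if c = '(' then cnt + 1 else cnt - 1) = 0
    · simp [scanB, h0]
    · simp [scanB, h0]

-- B's outer while loop accumulating 'parts' (joined concatenation) as recursion.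
def solB (p : List Char) : List Char :=
  match hp : p with
  | [] => []
  | c :: rest =>
    let r := scanB p 0
    let u := p.take r.2
    let v := p.drop r.2
    if r.1 = 0 ∧ c = '(' then u ++ solB v
    else ('(' :: solB v) ++ (')' :: (PySem.List.slice u (some 1) (some (-1))).map (fun ch => if ch = '(' then ')' else '('))
termination_by p.length
decreasing_by
  all_goals
    subst hp
    have h1 : 1 ≤ (scanB (c :: rest) 0).2 := scanB_pos _ 0 (by simp)
    simp only [List.length_drop, List.length_cons]
    omega

def solution_alt (p : String) : String := String.ofList (solB p.toList)

-- ===== PRECONDITION & SPEC =====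
def Spec_solution (p : String) (out : String) : Prop := out = solution_alt p
instance (p : String) (out : String) : Decidable (Spec_solution p out) := by unfold Spec_solution; infer_instance

-- ===== CLAIM (what is proved, stated in full; the proofs are below) =====
def Claim_equal_solution : Prop := ∀ (p : String), Dom_solution p → Spec_solution p (solution p)

-- ===== LEMMAS AND PROOFS =====

-- Counter model of A's stack: the stack is always (replicate n '('), n its length.
def cntRight : Nat → List Char → Bool
  | n, [] => n == 0
  | n, c :: r =>
    if c = '(' then cntRight (n + 1) r
    else match n with
      | 0 => false
      | m + 1 => cntRight m r

theorem isRightAux_replicate (l : List Char) : ∀ n,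
    isRightAux (List.replicate n '(') l = cntRight n l := by
  induction l with
  | nil => intro n; cases n <;> simp [isRightAux, cntRight, List.replicate_succ]
  | cons c r ih =>
    intro n
    by_cases hc : c = '('
    · subst hc
      have : List.replicate n '(' ++ ['('] = List.replicate (n + 1) '(' := by
        simp [List.replicate_succ']
      simp [isRightAux, cntRight, this, ih]
    · cases n with
      | zero => simp [isRightAux, cntRight, hc]
      | succ m =>
        have hlast : (List.replicate (m + 1) '(').getLast? = some '(' := by
          simp [List.getLast?_replicate]
        have hdrop : (List.replicate (m + 1) '(').dropLast = List.replicate m '(' := by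
          simp [List.dropLast_replicate]
        simp [isRightAux, cntRight, hc, hlast, hdrop, ih]

theorem isRightL_eq (l : List Char) : isRightL l = cntRight 0 l := by
  simpa using isRightAux_replicate l 0

-- loopA computes take/drop at scanB's split.
theorem loopA_eq (l : List Char) : ∀ (cnt : Int) (acc : List Char),
    loopA l cnt acc = (acc ++ l.take (scanB l cnt).2, l.drop (scanB l cnt).2) := by
  induction l with
  | nil => intro cnt acc; simp [loopA, scanB]
  | cons c rest ih =>
    intro cnt acc
    by_cases h0 : (if c = '(' then cnt + 1 else cnt - 1) = 0
    · simp [loopA, scanB, h0]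
    · simp [loopA, scanB, h0, ih, List.append_assoc]

-- no break ⇒ scanned everything
theorem scanB_full (l : List Char) : ∀ (cnt : Int),
    (scanB l cnt).1 ≠ 0 → (scanB l cnt).2 = l.length := by
  induction l with
  | nil => intro cnt _; simp [scanB]
  | cons c rest ih =>
    intro cnt h
    by_cases h0 : (if c = '(' then cnt + 1 else cnt - 1) = 0
    · simp [scanB, h0] at h
    · have hh : (scanB rest (if c = '(' then cnt + 1 else cnt - 1)).1 ≠ 0 := by
        simp [scanB, h0] at h; exact h
      simp [scanB, h0, ih _ hh]

-- break from a positive counter ⇒ the scanned take is right w.r.t. its opening debt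
theorem scanB_take_right (l : List Char) : ∀ (n : Nat), 0 < n →
    (scanB l (n : Int)).1 = 0 → cntRight n (l.take (scanB l (n : Int)).2) = true := by
  induction l with
  | nil => intro n hn h; simp [scanB] at h; omega
  | cons c rest ih =>
    intro n hn h
    by_cases hc : c = '('
    · subst hc
      have hne : ((n : Int) + 1) ≠ 0 := by omega
      simp only [scanB, if_pos rfl, if_neg hne] at h ⊢
      have : ((n : Int) + 1) = ((n + 1 : Nat) : Int) := by push_cast; ring
      rw [this] at h ⊢
      simpa [cntRight] using ih (n + 1) (by omega) h
    · cases n with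
      | zero => omega
      | succ m =>
        have hstep : (if c = '(' then ((m + 1 : Nat) : Int) + 1 else ((m + 1 : Nat) : Int) - 1) = (m : Int) := by
          simp [hc]
        by_cases hm : m = 0
        · subst hm
          simp only [scanB, hstep] at h ⊢
          simp [cntRight, hc]
        · have hne : (m : Int) ≠ 0 := by omega
          simp only [scanB, hstep, if_neg hne] at h ⊢
          simpa [cntRight, hc] using ih m (by omega) h

-- a right string (with opening debt n>0) makes the counter reach 0
theorem cntRight_scan_zero (l : List Char) : ∀ (n : Nat), 0 < n →
    cntRight n l = true → (scanB l (n : Int)).1 = 0 := by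
  induction l with
  | nil => intro n hn h; simp [cntRight] at h; omega
  | cons c rest ih =>
    intro n hn h
    by_cases hc : c = '('
    · subst hc
      have hne : ((n : Int) + 1) ≠ 0 := by omega
      simp only [cntRight] at h
      simp only [scanB, if_pos rfl, if_neg hne]
      have : ((n : Int) + 1) = ((n + 1 : Nat) : Int) := by push_cast; ring
      rw [this]
      exact ih (n + 1) (by omega) h
    · cases n with
      | zero => omega
      | succ m =>
        simp only [cntRight, if_neg hc] at h
        have hstep : (if c = '(' then ((m + 1 : Nat) : Int) + 1 else ((m + 1 : Nat) : Int) - 1) = (m : Int) := by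
          simp [hc]
        by_cases hm : m = 0
        · subst hm; simp [scanB, hc]
        · have hne : (m : Int) ≠ 0 := by omega
          simp only [scanB, hstep, if_neg hne]
          exact ih m (by omega) h

-- a right string's tail after the split is right
theorem cntRight_scan_drop (l : List Char) : ∀ (n : Nat), 0 < n →
    cntRight n l = true → cntRight 0 (l.drop (scanB l (n : Int)).2) = true := by
  induction l with
  | nil => intro n hn h; simp [cntRight] at h; omega
  | cons c rest ih =>
    intro n hn h
    by_cases hc : c = '('
    · subst hc
      have hne : ((n : Int) + 1) ≠ 0 := by omega
      simp only [cntRight] at h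
      simp only [scanB, if_pos rfl, if_neg hne]
      have : ((n : Int) + 1) = ((n + 1 : Nat) : Int) := by push_cast; ring
      rw [this]
      simpa using ih (n + 1) (by omega) h
    · cases n with
      | zero => omega
      | succ m =>
        simp only [cntRight, if_neg hc] at h
        have hstep : (if c = '(' then ((m + 1 : Nat) : Int) + 1 else ((m + 1 : Nat) : Int) - 1) = (m : Int) := by
          simp [hc]
        by_cases hm : m = 0
        · subst hm
          simp only [scanB, hstep]
          simpa [cntRight] using h
        · have hne : (m : Int) ≠ 0 := by omega
          simp only [scanB, hstep, if_neg hne]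
          simpa using ih m (by omega) h

theorem foldl_flip (l : List Char) : ∀ (init : List Char),
    l.foldl (fun s c => s ++ [if c = '(' then ')' else '(']) init
      = init ++ l.map (fun c => if c = '(' then ')' else '(') := by
  induction l with
  | nil => intro init; simp
  | cons c r ih => intro init; simp [ih, List.append_assoc]

-- B is the identity on right strings (A's isRight(p) shortcut).
theorem solB_right (p : List Char) (h : cntRight 0 p = true) : solB p = p := by
  induction hn : p.length using Nat.strong_induction_on generalizing p with
  | _ n ih =>
    subst hn
    cases p with
    | nil => simp [solB]
    | cons c rest =>
      have hc : c = '(' := by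
        by_contra hc
        simp [cntRight, hc] at h
      subst hc
      have hr : cntRight 1 rest = true := by simpa [cntRight] using h
      have hscan : scanB ('(' :: rest) 0 = ((scanB rest 1).1, (scanB rest 1).2 + 1) := by
        simp [scanB]
      have hz : (scanB rest 1).1 = 0 := by
        simpa using cntRight_scan_zero rest 1 (by omega) hr
      have hvr : cntRight 0 (rest.drop (scanB rest 1).2) = true := by
        simpa using cntRight_scan_drop rest 1 (by omega) hr
      have hlen : (rest.drop (scanB rest 1).2).length < ('(' :: rest).length := by
        simp only [List.length_drop, List.length_cons]; omega
      have hrec := ih _ hlen _ hvr rfl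
      rw [solB]
      simp [hscan, hz, hrec, List.take_succ_cons, List.drop_succ_cons, List.take_append_drop]

theorem solA_eq_solB (p : List Char) : solA p = solB p := by
  induction hn : p.length using Nat.strong_induction_on generalizing p with
  | _ n ih =>
    subst hn
    cases p with
    | nil => simp [solA, solB]
    | cons c rest =>
      by_cases hR : cntRight 0 (c :: rest) = true
      · rw [solA, solB_right _ hR]
        simp [isRightL_eq, hR]
      · rw [solA]
        have hRA : isRightL (c :: rest) = false := by
          rw [isRightL_eq]; simpa using hR
        simp only [reduceCtorEq, dite_false, hRA, Bool.false_eq_true, if_false]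
        rcases hsc : scanB (c :: rest) 0 with ⟨cres, k⟩
        have hloop := loopA_eq (c :: rest) 0 []
        rw [hsc] at hloop
        have hu : (loopA (c :: rest) 0 []).1 = (c :: rest).take k := by rw [hloop]; simp
        have hv : (loopA (c :: rest) 0 []).2 = (c :: rest).drop k := by rw [hloop]
        have hk1 : 1 ≤ k := by
          have := scanB_pos (c :: rest) 0 (by simp)
          rw [hsc] at this; exact this
        have hvlen : ((c :: rest).drop k).length < (c :: rest).length := by
          simp only [List.length_drop, List.length_cons]; omega
        -- equivalence of the two branch tests
        have htest : (cntRight 0 ((c :: rest).take k) = true) ↔ (cres = 0 ∧ c = '(') := by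
          constructor
          · intro hur
            have hcz : cres = 0 := by
              by_contra hcz
              have hfull := scanB_full (c :: rest) 0 (by rw [hsc]; exact hcz)
              rw [hsc] at hfull
              simp only at hfull
              rw [hfull, List.take_length] at hur
              exact hR hur
            refine ⟨hcz, ?_⟩
            have hcons : (c :: rest).take k = c :: rest.take (k - 1) := by
              cases k with
              | zero => omega
              | succ m => simp [List.take_succ_cons]
            rw [hcons] at hur
            by_contra hc
            simp [cntRight, hc] at hur
          · rintro ⟨hcz, hc⟩
            subst hc hcz
            have hscan : scanB ('(' :: rest) 0 = ((scanB rest 1).1, (scanB rest 1).2 + 1) := by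
              simp [scanB]
            rw [hscan] at hsc
            have hz : (scanB rest 1).1 = 0 := by
              have := congrArg Prod.fst hsc; simpa using this
            have hkk : k = (scanB rest 1).2 + 1 := by
              have := congrArg Prod.snd hsc; simpa using this.symm
            have hright := scanB_take_right rest 1 (by omega) (by simpa using hz)
            rw [hkk]
            simp only [List.take_succ_cons]
            simpa [cntRight] using hright
        by_cases hB : cres = 0 ∧ c = '('
        · -- u is right: both take the u ++ sol v branch
          have hur : cntRight 0 ((c :: rest).take k) = true := htest.mpr hB
          have hurA : isRightL (loopA (c :: rest) 0 []).1 = true := by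
            rw [hu, isRightL_eq]; exact hur
          rw [solB, hsc]
          rw [if_pos hB]
          simp only [hurA, not_true, Bool.true_eq_false]
          rw [if_neg (by simp)]
          rw [hu, hv, ih _ hvlen _ rfl]
        · -- u is not right: both take the flip branch
          have hur : cntRight 0 ((c :: rest).take k) = false := by
            by_contra h'
            exact hB (htest.mp (by simpa using h'))
          have hurA : isRightL (loopA (c :: rest) 0 []).1 = false := by
            rw [hu, isRightL_eq]; exact hur
          rw [solB, hsc]
          rw [if_neg hB]
          rw [if_pos (by simp [hurA])]
          rw [foldl_flip, hu, hv, ih _ hvlen _ rfl]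
          simp [List.append_assoc]

-- ===== VERDICT (by name: the statement is the Claim_ definition above) =====
theorem solution_spec : Claim_equal_solution := by
  intro p _
  unfold Spec_solution solution solution_alt
  rw [solA_eq_solB]
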